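-- pv_equiv track=rewrite | github.com/romainpasquier/Cryptage-Decryptage-d-images | Annexe/Force_brut_guidee.py | combinaisons
-- ===== SOURCE A (Python) =====
-- def combinaisons(n):
--     L = []
--     for a in range(1,n+1):
--         for b in range(1, n+1):
--             for c in range(1, n+1):
--                 for d in range(1, n+1):
--                     L.append([a, b, c, d])
--     return L
-- ===== SOURCE B (Python) =====
-- def combinaisons(n):
--     m = len(range(1, n + 1))
--     L = []
--     for i in range(m ** 4):
--         L.append([i // m ** 3 % m + 1, i // m ** 2 % m + 1, i // m % m + 1, i % m + 1])
--     return L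
-- ===== Notes on version B (the rewrite author's own statement) =====
-- stated objective: alternative
-- what changed: Replaced the four nested loops by a single flat loop over range(m**4) that decodes each index into four base-m digits with // and %.
import Mathlib
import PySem

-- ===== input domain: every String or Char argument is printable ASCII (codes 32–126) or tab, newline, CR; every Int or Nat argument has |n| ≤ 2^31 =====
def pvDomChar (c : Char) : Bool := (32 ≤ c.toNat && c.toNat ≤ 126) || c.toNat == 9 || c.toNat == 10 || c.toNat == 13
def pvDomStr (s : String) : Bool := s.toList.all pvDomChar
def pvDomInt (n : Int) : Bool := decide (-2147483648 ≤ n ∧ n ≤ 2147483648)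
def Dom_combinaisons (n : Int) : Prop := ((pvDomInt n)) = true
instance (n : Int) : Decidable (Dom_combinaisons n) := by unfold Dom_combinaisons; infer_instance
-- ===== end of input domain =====

-- B replaces A's four nested loops by one flat loop over range(m**4) that decodes each
-- index into four base-m digits (objective: alternative decomposition, same cost).

-- ===== PORT A =====
def combinaisons (n : Int) : List (List Int) :=
  (PySem.List.pyRange 1 (n + 1) 1).foldl (fun L a =>
    (PySem.List.pyRange 1 (n + 1) 1).foldl (fun L b =>
      (PySem.List.pyRange 1 (n + 1) 1).foldl (fun L c =>
        (PySem.List.pyRange 1 (n + 1) 1).foldl (fun L d =>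
          L ++ [[a, b, c, d]]) L) L) L) []

-- ===== PORT B =====
def combinaisons_alt (n : Int) : List (List Int) :=
  let m : Int := ((PySem.List.pyRange 1 (n + 1) 1).length : Int)
  (PySem.List.pyRange 0 (m ^ 4) 1).foldl (fun L i =>
    L ++ [[PySem.Int.mod (PySem.Int.floordiv i (m ^ 3)) m + 1,
           PySem.Int.mod (PySem.Int.floordiv i (m ^ 2)) m + 1,
           PySem.Int.mod (PySem.Int.floordiv i m) m + 1,
           PySem.Int.mod i m + 1]]) []

-- ===== PRECONDITION & SPEC =====
def Spec_combinaisons (n : Int) (out : List (List Int)) : Prop := out = combinaisons_alt n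
instance (n : Int) (out : List (List Int)) : Decidable (Spec_combinaisons n out) := by unfold Spec_combinaisons; infer_instance

-- ===== CLAIM (what is proved, stated in full; the proofs are below) =====
def Claim_equal_combinaisons : Prop := ∀ (n : Int), Dom_combinaisons n → Spec_combinaisons n (combinaisons n)

-- ===== LEMMAS AND PROOFS =====

-- a block of `a` uniform chunks of length `b` laid out flat: index k ↦ (k / b, k % b)
theorem flatMap_range_map {α : Type} (a b : ℕ) (f : ℕ → ℕ → α) :
    (List.range a).flatMap (fun i => (List.range b).map (f i)) =
    (List.range (a * b)).map (fun k => f (k / b) (k % b)) := by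
  induction a with
  | zero => simp
  | succ a ih =>
    rw [List.range_succ, List.flatMap_append, ih, Nat.succ_mul, List.range_add, List.map_append]
    simp only [List.flatMap_cons, List.flatMap_nil, List.append_nil, List.map_map]
    congr 1
    apply List.map_congr_left
    intro j hj
    simp only [List.mem_range] at hj
    have hb : 0 < b := Nat.pos_of_ne_zero (by omega)
    simp only [Function.comp_apply]
    rw [Nat.add_comm (a * b) j, Nat.add_mul_div_right _ _ hb, Nat.div_eq_of_lt hj,
        Nat.add_mul_mod_self_right, Nat.mod_eq_of_lt hj, Nat.zero_add]

-- the base-m digit row both programs produce at flat index k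
def pvDigits (m k : ℕ) : List Int :=
  [1 + ((k / m ^ 3 % m : ℕ) : Int), 1 + ((k / m ^ 2 % m : ℕ) : Int),
   1 + ((k / m % m : ℕ) : Int), 1 + ((k % m : ℕ) : Int)]

theorem combinaisons_eq_map (n : Int) :
    combinaisons n = (List.range ((n + 1 - 1).toNat ^ 4)).map (pvDigits (n + 1 - 1).toNat) := by
  unfold combinaisons
  set m := (n + 1 - 1).toNat with hm
  rw [PySem.List.pyRange_one 1 (n + 1), ← hm]
  simp only [PySem.List.foldl_append_singleton_eq_map, PySem.List.foldl_append_eq_flatMap,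
    List.nil_append, List.flatMap_map, List.map_map, Function.comp_def]
  simp only [flatMap_range_map]
  have h4 : m * (m * (m * m)) = m ^ 4 := by ring
  rw [h4]
  apply List.map_congr_left
  intro k hk
  simp only [List.mem_range] at hk
  rcases Nat.eq_zero_or_pos m with h0 | hpos
  · simp [h0] at hk
  · have e3 : m * (m * m) = m ^ 3 := by ring
    have e2 : m * m = m ^ 2 := by ring
    rw [e3, e2, pvDigits]
    have htop : k / m ^ 3 = k / m ^ 3 % m := by
      rw [Nat.mod_eq_of_lt]
      exact Nat.div_lt_of_lt_mul (by rw [← pow_succ]; exact hk)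
    have hd2 : k % m ^ 3 / m ^ 2 = k / m ^ 2 % m := by
      rw [show m ^ 3 = m ^ 2 * m by ring]
      exact Nat.mod_mul_right_div_self k (m ^ 2) m
    have hmm : k % m ^ 3 % m ^ 2 = k % m ^ 2 :=
      Nat.mod_mod_of_dvd k (pow_dvd_pow m (by omega))
    have hd1 : k % m ^ 3 % m ^ 2 / m = k / m % m := by
      rw [hmm, show m ^ 2 = m * m by ring]
      exact Nat.mod_mul_right_div_self k m m
    have hd0 : k % m ^ 3 % m ^ 2 % m = k % m := by
      rw [hmm, Nat.mod_mod_of_dvd k (dvd_pow_self m (by omega))]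
    rw [← htop, hd2, hd1, hd0]

theorem combinaisons_alt_eq_map (n : Int) :
    combinaisons_alt n = (List.range ((n + 1 - 1).toNat ^ 4)).map (pvDigits (n + 1 - 1).toNat) := by
  unfold combinaisons_alt
  set m := (n + 1 - 1).toNat with hm
  simp only [PySem.List.length_pyRange_one, ← hm]
  have h4 : (((m : Int) ^ 4 - 0).toNat) = m ^ 4 := by
    rw [sub_zero, show ((m : Int) ^ 4) = ((m ^ 4 : ℕ) : Int) by push_cast; ring,
        Int.toNat_natCast]
  rw [PySem.List.pyRange_one 0 ((m : Int) ^ 4), h4,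
      PySem.List.foldl_append_singleton_eq_map, List.map_map]
  simp only [List.nil_append]
  apply List.map_congr_left
  intro k _
  simp only [Function.comp_apply, zero_add, pvDigits]
  have c3 : (m : Int) ^ 3 = ((m ^ 3 : ℕ) : Int) := by push_cast; ring
  have c2 : (m : Int) ^ 2 = ((m ^ 2 : ℕ) : Int) := by push_cast; ring
  rw [c3, c2]
  simp only [PySem.Int.floordiv_natCast, PySem.Int.mod_natCast]
  simp [add_comm]

-- ===== VERDICT (by name: the statement is the Claim_ definition above) =====
theorem combinaisons_spec : Claim_equal_combinaisons := by
  intro n _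
  unfold Spec_combinaisons
  rw [combinaisons_eq_map, combinaisons_alt_eq_map]
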